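-- pv_equiv track=rewrite | github.com/kurusnsn/deterministic-ml-engine | import-service/app/services/parser.py | _derive_termination
-- ===== SOURCE A (Python) =====
-- from typing import Any, Optional
--
-- def _derive_termination(wres: Optional[str], bres: Optional[str]) -> Optional[str]:
--     w = (wres or "").lower()
--     b = (bres or "").lower()
--     # prioritize specific outcomes
--     for term in ("resigned", "checkmated", "timeout", "abandoned", "forfeit"):
--         if w == term or b == term:
--             return term
--     if w in {"agreed", "stalemate", "draw"} or b in {"agreed", "stalemate", "draw"}:
--         return "draw"
--     if w == "win":
--         return "win"
--     if b == "win":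
--         return "win"
--     return None
-- ===== SOURCE B (Python) =====
-- from typing import Any, Optional
--
-- _TABLE = {
--     "resigned": (0, "resigned"),
--     "checkmated": (1, "checkmated"),
--     "timeout": (2, "timeout"),
--     "abandoned": (3, "abandoned"),
--     "forfeit": (4, "forfeit"),
--     "agreed": (5, "draw"),
--     "stalemate": (5, "draw"),
--     "draw": (5, "draw"),
--     "win": (6, "win"),
-- }
--
-- def _derive_termination(wres: Optional[str], bres: Optional[str]) -> Optional[str]:
--     pw = _TABLE.get((wres or "").lower())
--     pb = _TABLE.get((bres or "").lower())
--     if pw is None: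
--         return pb[1] if pb is not None else None
--     if pb is None:
--         return pw[1]
--     return pw[1] if pw[0] <= pb[0] else pb[1]
-- ===== Notes on version B (the rewrite author's own statement) =====
-- stated objective: simpler
-- what changed: Replaced A's ordered scan of five terms plus a draw-set and two win checks by a single priority table mapping each recognized string to a (rank, outcome) pair: two lookups and a rank minimum replace the branch chain.
import Mathlib
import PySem

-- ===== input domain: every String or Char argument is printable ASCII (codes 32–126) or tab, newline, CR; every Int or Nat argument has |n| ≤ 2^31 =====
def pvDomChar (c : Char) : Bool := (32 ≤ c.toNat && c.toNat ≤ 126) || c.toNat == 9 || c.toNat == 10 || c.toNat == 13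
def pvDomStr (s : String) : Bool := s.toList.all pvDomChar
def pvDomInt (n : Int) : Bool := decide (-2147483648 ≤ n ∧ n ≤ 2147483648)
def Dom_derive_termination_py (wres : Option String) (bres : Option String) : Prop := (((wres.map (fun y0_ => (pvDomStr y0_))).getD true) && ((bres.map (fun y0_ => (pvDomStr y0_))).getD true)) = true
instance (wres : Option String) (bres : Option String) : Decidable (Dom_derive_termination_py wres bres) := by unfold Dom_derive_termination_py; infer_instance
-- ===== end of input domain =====

-- B replaces A's ordered scan + draw-set + win checks by one priority table: two lookups and a rank minimum (objective: simpler).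

-- ===== PORT A =====
-- the body of A after lowering: the for-loop over the five terms (as find?), then the draw set, then the win checks
def pvChainA (w b : String) : Option String :=
  match ["resigned", "checkmated", "timeout", "abandoned", "forfeit"].find?
      (fun t => w == t || b == t) with
  | some t => some t
  | none =>
    if w ∈ ["agreed", "stalemate", "draw"] ∨ b ∈ ["agreed", "stalemate", "draw"] then some "draw"
    else if w = "win" then some "win"
    else if b = "win" then some "win"
    else none

def derive_termination_py (wres : Option String) (bres : Option String) : Option String :=
  let w := PySem.Str.lower (wres.getD "")
  let b := PySem.Str.lower (bres.getD "")
  pvChainA w b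

-- ===== PORT B =====
def pvTable : PySem.Dict String (Nat × String) :=
  PySem.Dict.ofList
    [("resigned", (0, "resigned")), ("checkmated", (1, "checkmated")), ("timeout", (2, "timeout")),
     ("abandoned", (3, "abandoned")), ("forfeit", (4, "forfeit")), ("agreed", (5, "draw")),
     ("stalemate", (5, "draw")), ("draw", (5, "draw")), ("win", (6, "win"))]

def pvCombB (w b : String) : Option String :=
  match pvTable.get? w, pvTable.get? b with
  | none, none => none
  | none, some pb => some pb.2
  | some pw, none => some pw.2
  | some pw, some pb => if pw.1 ≤ pb.1 then some pw.2 else some pb.2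

def derive_termination_py_alt (wres : Option String) (bres : Option String) : Option String :=
  pvCombB (PySem.Str.lower (wres.getD "")) (PySem.Str.lower (bres.getD ""))

-- ===== PRECONDITION & SPEC =====
def Spec_derive_termination_py (wres : Option String) (bres : Option String) (out : Option String) : Prop := out = derive_termination_py_alt wres bres
instance (wres : Option String) (bres : Option String) (out : Option String) : Decidable (Spec_derive_termination_py wres bres out) := by unfold Spec_derive_termination_py; infer_instance

-- ===== CLAIM (what is proved, stated in full; the proofs are below) =====
def Claim_equal_derive_termination_py : Prop := ∀ (wres : Option String) (bres : Option String), Dom_derive_termination_py wres bres → Spec_derive_termination_py wres bres (derive_termination_py wres bres)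

-- ===== LEMMAS AND PROOFS =====

theorem pvTable_eq : pvTable = PySem.Dict.mk
    [("resigned", (0, "resigned")), ("checkmated", (1, "checkmated")), ("timeout", (2, "timeout")),
     ("abandoned", (3, "abandoned")), ("forfeit", (4, "forfeit")), ("agreed", (5, "draw")),
     ("stalemate", (5, "draw")), ("draw", (5, "draw")), ("win", (6, "win"))] := by decide

-- a string that is none of the nine keys is absent from the table
theorem pvGetNone (s : String)
    (h1 : s ≠ "resigned") (h2 : s ≠ "checkmated") (h3 : s ≠ "timeout") (h4 : s ≠ "abandoned")
    (h5 : s ≠ "forfeit") (h6 : s ≠ "agreed") (h7 : s ≠ "stalemate") (h8 : s ≠ "draw")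
    (h9 : s ≠ "win") : pvTable.get? s = none := by
  simp [pvTable_eq, PySem.Dict.get?, Ne.symm h1, Ne.symm h2,
        Ne.symm h3, Ne.symm h4, Ne.symm h5, Ne.symm h6, Ne.symm h7, Ne.symm h8, Ne.symm h9]

-- every string is one of the nine table keys (with its table entry) or absent from the table
theorem pvClassify (s : String) :
    (s = "resigned" ∧ pvTable.get? s = some (0, "resigned")) ∨
    (s = "checkmated" ∧ pvTable.get? s = some (1, "checkmated")) ∨
    (s = "timeout" ∧ pvTable.get? s = some (2, "timeout")) ∨
    (s = "abandoned" ∧ pvTable.get? s = some (3, "abandoned")) ∨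
    (s = "forfeit" ∧ pvTable.get? s = some (4, "forfeit")) ∨
    (s = "agreed" ∧ pvTable.get? s = some (5, "draw")) ∨
    (s = "stalemate" ∧ pvTable.get? s = some (5, "draw")) ∨
    (s = "draw" ∧ pvTable.get? s = some (5, "draw")) ∨
    (s = "win" ∧ pvTable.get? s = some (6, "win")) ∨
    (((s == "resigned") = false ∧ (s == "checkmated") = false ∧ (s == "timeout") = false ∧
      (s == "abandoned") = false ∧ (s == "forfeit") = false ∧ (s == "agreed") = false ∧
      (s == "stalemate") = false ∧ (s == "draw") = false ∧ (s == "win") = false) ∧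
     pvTable.get? s = none) := by
  by_cases h1 : s = "resigned"; · subst h1; exact Or.inl ⟨rfl, by decide⟩
  by_cases h2 : s = "checkmated"; · subst h2; exact Or.inr (Or.inl ⟨rfl, by decide⟩)
  by_cases h3 : s = "timeout"; · subst h3; exact Or.inr (Or.inr (Or.inl ⟨rfl, by decide⟩))
  by_cases h4 : s = "abandoned"; · subst h4; exact Or.inr (Or.inr (Or.inr (Or.inl ⟨rfl, by decide⟩)))
  by_cases h5 : s = "forfeit"; · subst h5; exact Or.inr (Or.inr (Or.inr (Or.inr (Or.inl ⟨rfl, by decide⟩))))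
  by_cases h6 : s = "agreed"; · subst h6; exact Or.inr (Or.inr (Or.inr (Or.inr (Or.inr (Or.inl ⟨rfl, by decide⟩)))))
  by_cases h7 : s = "stalemate"; · subst h7; exact Or.inr (Or.inr (Or.inr (Or.inr (Or.inr (Or.inr (Or.inl ⟨rfl, by decide⟩))))))
  by_cases h8 : s = "draw"; · subst h8; exact Or.inr (Or.inr (Or.inr (Or.inr (Or.inr (Or.inr (Or.inr (Or.inl ⟨rfl, by decide⟩)))))))
  by_cases h9 : s = "win"; · subst h9; exact Or.inr (Or.inr (Or.inr (Or.inr (Or.inr (Or.inr (Or.inr (Or.inr (Or.inl ⟨rfl, by decide⟩))))))))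
  exact Or.inr (Or.inr (Or.inr (Or.inr (Or.inr (Or.inr (Or.inr (Or.inr (Or.inr
    ⟨⟨beq_eq_false_iff_ne.mpr h1, beq_eq_false_iff_ne.mpr h2, beq_eq_false_iff_ne.mpr h3,
      beq_eq_false_iff_ne.mpr h4, beq_eq_false_iff_ne.mpr h5, beq_eq_false_iff_ne.mpr h6,
      beq_eq_false_iff_ne.mpr h7, beq_eq_false_iff_ne.mpr h8, beq_eq_false_iff_ne.mpr h9⟩,
     pvGetNone s h1 h2 h3 h4 h5 h6 h7 h8 h9⟩))))))))

theorem pvCore (w b : String) : pvChainA w b = pvCombB w b := by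
  rcases pvClassify w with hw | hw | hw | hw | hw | hw | hw | hw | hw | hw <;>
    rcases pvClassify b with hb | hb | hb | hb | hb | hb | hb | hb | hb | hb <;>
      (obtain ⟨hw1, hw2⟩ := hw; obtain ⟨hb1, hb2⟩ := hb;
       simp_all [pvChainA, pvCombB,])

-- ===== VERDICT (by name: the statement is the Claim_ definition above) =====
theorem derive_termination_py_spec : Claim_equal_derive_termination_py := by
  intro wres bres _
  unfold Spec_derive_termination_py derive_termination_py derive_termination_py_alt
  exact pvCore (PySem.Str.lower (wres.getD "")) (PySem.Str.lower (bres.getD ""))
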